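-- pv_equiv track=rewrite | github.com/v-atamanenko/g-gee-archive | ggee-compile-database.py | _filter_arrays
-- ===== SOURCE A (Python) =====
-- def _dk(_dict, _idx):
--     return list(_dict.keys())[_idx]
--
-- def _dv(_dict, _idx):
--     return list(_dict.values())[_idx]
--
-- def _dvl(_dict):
--     if len(list(_dict.values())) == 0:
--         return ""
--     return list(_dict.values())[len(list(_dict.values())) - 1]
--
-- def _filter_arrays(_dict):
--     if len(_dict.keys()) == 0:
--         return _dict;
--
--     _dict_new = { _dk(_dict, 0): _dv(_dict, 0)}
--     for key, val in _dict.items():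
--         if key in _dict_new.keys():
--             continue
--         if len(_dvl(_dict_new)) == len(val):
--             i = 0
--             m = True
--             for item in _dvl(_dict_new):
--                 if item != val[i]:
--                     m = False
--                     break
--                 i += 1
--             if m:
--                 continue
--         _dict_new[key] = val
--         _dict_new = dict(sorted(_dict_new.items()))
--     return _dict_new
-- ===== SOURCE B (Python) =====
-- def _filter_arrays(_dict):
--     # Single pass tracking the current max key and its value; one final sort.
--     items = list(_dict.items())
--     if not items:
--         return _dict
--     k0, v0 = items[0]
--     kept = [(k0, v0)]
--     max_key, max_val = k0, v0
--     for key, val in items[1:]: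
--         if val == max_val:
--             continue
--         kept.append((key, val))
--         if max_key < key:
--             max_key, max_val = key, val
--     return dict(sorted(kept))
-- ===== Notes on version B (the rewrite author's own statement) =====
-- stated objective: faster
-- what changed: B replaces A's per-insertion dict re-sort and repeated key/value-list materialisation with a single pass that tracks the current max key and its value incrementally, sorting the kept items once at the end.
import Mathlib
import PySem

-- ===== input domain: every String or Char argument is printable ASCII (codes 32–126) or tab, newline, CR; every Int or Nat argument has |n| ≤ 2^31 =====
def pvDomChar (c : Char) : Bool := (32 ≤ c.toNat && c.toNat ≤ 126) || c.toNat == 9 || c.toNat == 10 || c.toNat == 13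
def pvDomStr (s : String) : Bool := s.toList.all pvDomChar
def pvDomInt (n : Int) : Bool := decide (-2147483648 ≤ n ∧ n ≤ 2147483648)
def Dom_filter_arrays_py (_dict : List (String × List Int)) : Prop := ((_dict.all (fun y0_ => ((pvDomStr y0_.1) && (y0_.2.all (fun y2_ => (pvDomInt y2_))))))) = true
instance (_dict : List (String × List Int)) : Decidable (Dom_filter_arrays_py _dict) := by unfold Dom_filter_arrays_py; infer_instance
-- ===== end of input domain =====

-- B drops the per-insertion re-sort and per-step key-list scans of A: it tracks the current
-- max key/value in one pass and sorts once at the end (objective: faster).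

-- ===== PORT A =====
-- _dvl(_dict_new): value of the last item; Python returns "" on an empty dict (none here;
-- unreachable inside the loop, where _dict_new is never empty)
def pvDvlA (d : PySem.Dict String (List Int)) : Option (List Int) :=
  if d.values.length = 0 then none
  else PySem.List.pyGet? d.values ((d.values.length : Int) - 1)

-- len(_dvl(...)) : len("") = 0 on the unreachable empty case
def pvDvlLenA : Option (List Int) → Nat
  | none => 0
  | some l => l.length

-- the inner 'for item in _dvl(...)' elementwise comparison loop (m); none from pyGet? would be
-- an IndexError, which the equal-length guard rules out
def pvEqLoopA : List Int → List Int → Int → Bool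
  | [], _, _ => true
  | item :: rest, val, i =>
    match PySem.List.pyGet? val i with
    | none => false
    | some x => if item ≠ x then false else pvEqLoopA rest val (i + 1)

-- the loop over "" leaves m = True on the unreachable empty case
def pvMatchA : Option (List Int) → List Int → Bool
  | none, _ => true
  | some l, val => pvEqLoopA l val 0

-- _dict_new[key] = val; _dict_new = dict(sorted(_dict_new.items()))
-- (a dict's keys are pairwise distinct, so Python's tuple sort is the sort by key)
def pvInsertSortA (dnew : PySem.Dict String (List Int)) (kv : String × List Int) :
    PySem.Dict String (List Int) :=
  PySem.Dict.mk (PySem.List.sorted ((dnew.insert kv.1 kv.2).items) (fun p => p.1) false)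

-- one iteration of the 'for key, val in _dict.items()' loop
def pvStepA (dnew : PySem.Dict String (List Int)) (kv : String × List Int) :
    PySem.Dict String (List Int) :=
  if dnew.contains kv.1 then dnew
  else if pvDvlLenA (pvDvlA dnew) = kv.2.length then
    (if pvMatchA (pvDvlA dnew) kv.2 then dnew else pvInsertSortA dnew kv)
  else pvInsertSortA dnew kv

def filter_arrays_py (_dict : List (String × List Int)) : List (String × List Int) :=
  let d := PySem.Dict.mk _dict
  if d.keys.length = 0 then _dict
  else
    match PySem.List.pyGet? d.keys 0, PySem.List.pyGet? d.values 0 with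
    | some k0, some v0 => (d.items.foldl pvStepA (PySem.Dict.mk [(k0, v0)])).items
    | _, _ => _dict    -- unreachable guard: the dict is nonempty here

-- ===== PORT B =====
-- one iteration of B's loop: state = (kept items, current max key, its value)
def pvStepB (st : List (String × List Int) × String × List Int) (kv : String × List Int) :
    List (String × List Int) × String × List Int :=
  if kv.2 = st.2.2 then st
  else (st.1 ++ [kv], if st.2.1 < kv.1 then (kv.1, kv.2) else st.2)

def filter_arrays_py_alt (_dict : List (String × List Int)) : List (String × List Int) :=
  match _dict with
  | [] => _dict
  | (k0, v0) :: rest =>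
    let st := rest.foldl pvStepB ([(k0, v0)], k0, v0)
    PySem.List.sorted st.1 (fun p => p.1) false

-- ===== PRECONDITION & SPEC =====
-- Pre_ requires pairwise-distinct keys: the argument encodes a Python dict's items, and a
-- dict's keys are always distinct, so no actual Python input is excluded.
def Pre_filter_arrays_py (_dict : List (String × List Int)) : Prop :=
  (_dict.map Prod.fst).Nodup

instance (_dict : List (String × List Int)) : Decidable (Pre_filter_arrays_py _dict) := by
  unfold Pre_filter_arrays_py; infer_instance

def pvWitness_filter_arrays_py : (List (String × List Int)) := [("a", [1]), ("b", [])]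

def Spec_filter_arrays_py (_dict : List (String × List Int)) (out : List (String × List Int)) : Prop := out = filter_arrays_py_alt _dict
instance (_dict : List (String × List Int)) (out : List (String × List Int)) : Decidable (Spec_filter_arrays_py _dict out) := by unfold Spec_filter_arrays_py; infer_instance

-- ===== CLAIM (what is proved, stated in full; the proofs are below) =====
def Claim_equal_filter_arrays_py : Prop := ∀ (_dict : List (String × List Int)), Dom_filter_arrays_py _dict → Pre_filter_arrays_py _dict → Spec_filter_arrays_py _dict (filter_arrays_py _dict)

-- ===== LEMMAS AND PROOFS =====

-- pairwise ≤ on keys plus distinct keys is pairwise < on keys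
theorem pv_pairwise_lt_of_le_nodup (l : List (String × List Int))
    (h1 : l.Pairwise (fun a b => a.1 ≤ b.1)) (h2 : (l.map Prod.fst).Nodup) :
    l.Pairwise (fun a b => a.1 < b.1) := by
  rw [List.nodup_iff_pairwise_ne, List.pairwise_map] at h2
  exact (h1.and h2).imp (fun h => lt_of_le_of_ne h.1 h.2)

-- sorting by key is invariant under permutation when keys are distinct
theorem pv_sorted_congr_perm (l1 l2 : List (String × List Int))
    (hp : l1.Perm l2) (h2 : (l2.map Prod.fst).Nodup) :
    PySem.List.sorted l1 (fun p => p.1) false = PySem.List.sorted l2 (fun p => p.1) false := by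
  have hperm := PySem.List.sorted_perm l2 (fun p => p.1) false
  have hnd : ((PySem.List.sorted l2 (fun p => p.1) false).map Prod.fst).Nodup :=
    (hperm.map Prod.fst).nodup_iff.mpr h2
  exact PySem.List.sorted_eq_of_perm_of_pairwise_lt l1 _ _
    (hperm.trans hp.symm)
    (pv_pairwise_lt_of_le_nodup _ (PySem.List.sorted_pairwise l2 _) hnd)

-- with distinct keys, the last element of a key-sorted list is the max-key item
theorem pv_getLast_max (s : List (String × List Int)) (mk : String) (mv : List Int)
    (hs : s.Pairwise (fun a b => a.1 ≤ b.1)) (hnd : (s.map Prod.fst).Nodup)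
    (hmem : (mk, mv) ∈ s) (hmax : ∀ p ∈ s, p.1 ≤ mk) :
    s.getLast? = some (mk, mv) := by
  obtain ⟨j, hj, hje⟩ := List.getElem_of_mem hmem
  have hlen : 0 < s.length := by
    cases s with
    | nil => simp at hmem
    | cons _ _ => simp
  have hi : s.length - 1 < s.length := by omega
  have hij : j = s.length - 1 := by
    by_contra hne'
    have hjlt : j < s.length - 1 := by omega
    have hlt := (List.pairwise_iff_getElem.mp hs) j (s.length - 1) hj hi hjlt
    rw [hje] at hlt
    have hle := hmax (s[s.length - 1]) (List.getElem_mem hi)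
    have heq : s[j].1 = s[s.length - 1].1 := by rw [hje]; exact le_antisymm hlt hle
    have hm : (s.map Prod.fst)[j]'(by simpa using hj)
        = (s.map Prod.fst)[s.length - 1]'(by simpa using hi) := by
      simp only [List.getElem_map]; exact heq
    exact hne' ((List.Nodup.getElem_inj_iff hnd).mp hm)
  subst hij
  rw [List.getLast?_eq_getElem?, List.getElem?_eq_getElem hi]
  exact congrArg some hje

-- the inner comparison loop decides list equality of the tails
theorem pv_eqLoop_spec (l : List Int) : ∀ (val : List Int) (i : Nat),
    l.length + i = val.length →
    pvEqLoopA l val (i : Int) = decide (l = val.drop i) := by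
  induction l with
  | nil =>
    intro val i h
    simp only [List.length_nil, Nat.zero_add] at h
    have hd : val.drop i = [] := List.drop_eq_nil_of_le (by omega)
    simp [pvEqLoopA, hd]
  | cons item rest ih =>
    intro val i h
    simp only [List.length_cons] at h
    have hi : i < val.length := by omega
    have hget : PySem.List.pyGet? val (i : Int) = some val[i] := by
      rw [PySem.List.pyGet?_natCast, List.getElem?_eq_getElem hi]
    have hdrop : val.drop i = val[i] :: val.drop (i + 1) :=
      List.drop_eq_getElem_cons hi
    have ihs : pvEqLoopA rest val ((i : Int) + 1) = decide (rest = val.drop (i + 1)) := by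
      have := ih val (i + 1) (by omega)
      rw [show ((i : Int) + 1) = (((i + 1 : Nat)) : Int) by push_cast; ring]
      exact this
    by_cases hx : item = val[i]
    · simp only [pvEqLoopA, hget, hx, ne_eq, not_true_eq_false, if_false, ihs]
      rw [decide_eq_decide]
      constructor
      · intro hr; rw [hdrop, hr]
      · intro hc
        rw [hdrop] at hc
        exact (List.cons_eq_cons.mp hc).2
    · simp only [pvEqLoopA, hget]
      rw [if_pos (by simpa using hx)]
      have : ¬(item :: rest = List.drop i val) := by
        intro hc
        rw [hdrop] at hc
        exact hx (List.cons_eq_cons.mp hc).1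
      simp [this]

theorem pv_eqLoop_iff (l val : List Int) :
    (l.length = val.length ∧ pvEqLoopA l val 0 = true) ↔ l = val := by
  have hspec := pv_eqLoop_spec l val 0
  simp only [Nat.cast_zero, List.drop_zero, Nat.add_zero] at hspec
  constructor
  · rintro ⟨hlen, hloop⟩
    rw [hspec hlen] at hloop
    exact of_decide_eq_true hloop
  · rintro rfl
    exact ⟨rfl, by simp [hspec rfl]⟩

-- the main loop invariant: A's dict is B's kept list sorted, and (mk, mv) is B's max-key item
theorem pv_loop_eq (rest : List (String × List Int)) :
    ∀ (kept : List (String × List Int)) (mk : String) (mv : List Int)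
      (dnew : PySem.Dict String (List Int)),
    dnew.items = PySem.List.sorted kept (fun p => p.1) false →
    (kept.map Prod.fst).Nodup →
    (mk, mv) ∈ kept →
    (∀ p ∈ kept, p.1 ≤ mk) →
    (rest.map Prod.fst).Nodup →
    (∀ p ∈ rest, p.1 ∉ kept.map Prod.fst) →
    (rest.foldl pvStepA dnew).items =
      PySem.List.sorted (rest.foldl pvStepB (kept, mk, mv)).1 (fun p => p.1) false := by
  induction rest with
  | nil => intro kept mk mv dnew hitems _ _ _ _ _; simpa using hitems
  | cons kv rest ih =>
    intro kept mk mv dnew hitems hnd hmem hmax hrnd hfresh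
    rw [List.map_cons] at hrnd
    obtain ⟨hkvrest, hrnd'⟩ := List.nodup_cons.mp hrnd
    have hkeptnd : ((PySem.List.sorted kept (fun p => p.1) false).map Prod.fst).Nodup :=
      ((PySem.List.sorted_perm kept _ false).map Prod.fst).nodup_iff.mpr hnd
    have hnotin : kv.1 ∉ kept.map Prod.fst := hfresh kv List.mem_cons_self
    have hcontains : dnew.contains kv.1 = false := by
      simp only [PySem.Dict.contains, hitems, List.any_eq_false, beq_iff_eq]
      intro p hp hpe
      exact hnotin (hpe ▸ List.mem_map_of_mem ((PySem.List.mem_sorted _ _ _ _).mp hp))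
    have hlast : (PySem.List.sorted kept (fun p => p.1) false).getLast? = some (mk, mv) :=
      pv_getLast_max _ mk mv (PySem.List.sorted_pairwise kept _) hkeptnd
        ((PySem.List.mem_sorted _ _ _ _).mpr hmem)
        (fun p hp => hmax p ((PySem.List.mem_sorted _ _ _ _).mp hp))
    have hslen : 0 < (PySem.List.sorted kept (fun p => p.1) false).length :=
      List.length_pos_iff.mpr
        (List.ne_nil_of_mem ((PySem.List.mem_sorted _ _ _ _).mpr hmem))
    have hvals : dnew.values = (PySem.List.sorted kept (fun p => p.1) false).map Prod.snd := by
      simp [PySem.Dict.values, hitems]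
    have hdvl : pvDvlA dnew = some mv := by
      unfold pvDvlA
      rw [hvals, if_neg (by simp only [List.length_map]; omega)]
      rw [show ((((PySem.List.sorted kept (fun p => p.1) false).map Prod.snd).length : Int) - 1)
          = ((((PySem.List.sorted kept (fun p => p.1) false).map Prod.snd).length - 1 : Nat) : Int)
          by simp only [List.length_map]; omega]
      rw [PySem.List.pyGet?_natCast, ← List.getLast?_eq_getElem?, List.getLast?_map, hlast]
      rfl
    by_cases hv : kv.2 = mv
    · -- skipped by both
      have hA : pvStepA dnew kv = dnew := by
        unfold pvStepA
        rw [hcontains, hdvl, if_neg (by simp), if_pos (by simp [pvDvlLenA, hv]),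
          if_pos (by
            simp only [pvMatchA]
            exact ((pv_eqLoop_iff mv kv.2).mpr hv.symm).2)]
      have hB : pvStepB (kept, mk, mv) kv = (kept, mk, mv) := by
        simp [pvStepB, hv]
      rw [List.foldl_cons, List.foldl_cons, hA, hB]
      exact ih kept mk mv dnew hitems hnd hmem hmax hrnd'
        (fun p hp => hfresh p (List.mem_cons_of_mem _ hp))
    · -- inserted by both
      have hndA : ((kept ++ [kv]).map Prod.fst).Nodup := by
        rw [show (kept ++ [kv]).map Prod.fst = kept.map Prod.fst ++ [kv.1] by simp,
          List.nodup_append]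
        refine ⟨hnd, List.nodup_singleton _, ?_⟩
        intro a ha b hb
        rw [List.mem_singleton] at hb
        subst hb
        rintro rfl
        exact hnotin ha
      have hA : pvStepA dnew kv = PySem.Dict.mk
          (PySem.List.sorted (kept ++ [kv]) (fun p => p.1) false) := by
        have hins : pvInsertSortA dnew kv = PySem.Dict.mk
            (PySem.List.sorted (kept ++ [kv]) (fun p => p.1) false) := by
          unfold pvInsertSortA
          have hinsitems : (dnew.insert kv.1 kv.2).items = dnew.items ++ [(kv.1, kv.2)] := by
            simp [PySem.Dict.insert, hcontains]
          rw [hinsitems, hitems]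
          congr 1
          exact pv_sorted_congr_perm _ _
            ((PySem.List.sorted_perm kept _ false).append_right [(kv.1, kv.2)]) hndA
        unfold pvStepA
        rw [hcontains, hdvl]
        by_cases hlen : pvDvlLenA (some mv) = kv.2.length
        · rw [if_neg (by simp), if_pos hlen, if_neg, hins]
          simp only [pvMatchA]
          intro hm
          exact hv (((pv_eqLoop_iff mv kv.2).mp ⟨by simpa [pvDvlLenA] using hlen, hm⟩).symm)
        · rw [if_neg (by simp), if_neg hlen, hins]
      have hB : pvStepB (kept, mk, mv) kv =
          (kept ++ [kv], if mk < kv.1 then (kv.1, kv.2) else (mk, mv)) := by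
        simp [pvStepB, hv]
      rw [List.foldl_cons, List.foldl_cons, hA, hB]
      have hfresh' : ∀ p ∈ rest, p.1 ∉ (kept ++ [kv]).map Prod.fst := by
        intro p hp
        rw [show (kept ++ [kv]).map Prod.fst = kept.map Prod.fst ++ [kv.1] by simp,
          List.mem_append, List.mem_singleton]
        rintro (h | h)
        · exact hfresh p (List.mem_cons_of_mem _ hp) h
        · exact hkvrest (h ▸ List.mem_map_of_mem hp)
      by_cases hlt : mk < kv.1
      · rw [if_pos hlt]
        exact ih (kept ++ [kv]) kv.1 kv.2 _ rfl hndA (by simp)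
          (by
            intro p hp
            rcases List.mem_append.mp hp with h | h
            · exact le_of_lt (lt_of_le_of_lt (hmax p h) hlt)
            · rw [List.mem_singleton] at h; rw [h])
          hrnd' hfresh'
      · rw [if_neg hlt]
        exact ih (kept ++ [kv]) mk mv _ rfl hndA (List.mem_append_left _ hmem)
          (by
            intro p hp
            rcases List.mem_append.mp hp with h | h
            · exact hmax p h
            · rw [List.mem_singleton] at h; rw [h]; exact le_of_not_gt hlt)
          hrnd' hfresh'

-- ===== VERDICT (by name: the statement is the Claim_ definition above) =====
theorem filter_arrays_py_spec : Claim_equal_filter_arrays_py := by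
  intro _dict _ hpre
  unfold Spec_filter_arrays_py
  match _dict with
  | [] => rfl
  | (k0, v0) :: rest =>
    unfold filter_arrays_py filter_arrays_py_alt
    simp only [PySem.Dict.keys, List.map_cons, List.length_cons]
    rw [if_neg (by omega)]
    have hk : PySem.List.pyGet? (((k0, v0) :: rest).map Prod.fst) ((0 : Nat) : Int)
        = some k0 := by
      rw [PySem.List.pyGet?_natCast]; rfl
    have hv : PySem.List.pyGet? (((k0, v0) :: rest).map Prod.snd) ((0 : Nat) : Int)
        = some v0 := by
      rw [PySem.List.pyGet?_natCast]; rfl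
    simp only [Nat.cast_zero, List.map_cons] at hk hv
    simp only [PySem.Dict.values, List.map_cons]
    rw [hk, hv]
    show (List.foldl pvStepA (PySem.Dict.mk [(k0, v0)]) ((k0, v0) :: rest)).items
      = PySem.List.sorted (List.foldl pvStepB ([(k0, v0)], k0, v0) rest).1 (fun p => p.1) false
    have hstep0 : pvStepA (PySem.Dict.mk [(k0, v0)]) (k0, v0) = PySem.Dict.mk [(k0, v0)] := by
      unfold pvStepA
      rw [if_pos (by simp [PySem.Dict.contains])]
    rw [List.foldl_cons, hstep0]
    unfold Pre_filter_arrays_py at hpre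
    rw [List.map_cons] at hpre
    obtain ⟨hk0rest, hrestnd⟩ := List.nodup_cons.mp hpre
    exact pv_loop_eq rest [(k0, v0)] k0 v0 (PySem.Dict.mk [(k0, v0)])
      ((PySem.List.sorted_eq_self_of_pairwise [((k0 : String), (v0 : List Int))]
        (fun p => p.1) (List.pairwise_singleton _ _)).symm)
      (by simp) (by simp) (by simp)
      hrestnd
      (by
        intro p hp
        rw [List.map_singleton, List.mem_singleton]
        intro h
        exact hk0rest (by rw [← h]; exact List.mem_map_of_mem hp))
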